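-- pv_equiv track=rewrite | github.com/pypi-data/pypi-mirror-46 | packages/ocellaris/ocellaris-2019.1.0-py3-none-any.whl/ocellaris/utils/cpp_expression.py | get_identifiers
-- ===== SOURCE A (Python) =====
-- def get_identifiers(code_string):
--     """
--     Return all valid identifiers found in the C++ code string by finding
--     uninterrupted strings that start with a character or an underscore and
--     continues with characters, underscores or digits. Any spaces, tabs,
--     newlines, paranthesis, punctuations or newlines will mark the end of
--     an identifier (anything that is not underscore or alphanumeric).
--
--     The returned set will include reserved keywords (if, for, while ...),
--     names of types (float, double, int ...), names of functions that are
--     called (cos, sin ...) in addition to any variables that are used or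
--     defined in the code.
--     """
--     identifiers = set()
--     identifier = []
--     for c in code_string + ' ':
--         if identifier and (c == '_' or c.isalnum()):
--             identifier.append(c)
--         elif c == '_' or c.isalpha():
--             identifier = [c]
--         elif identifier:
--             identifiers.add(''.join(identifier))
--             identifier = None
--     return identifiers
-- ===== SOURCE B (Python) =====
-- def get_identifiers(code_string):
--     # Two-pass decomposition: blank out non-identifier chars, split into maximal
--     # runs, then keep each run from its first starter char ('_' or alphabetic).
--     def is_ident(c):
--         return c == '_' or c.isalnum()
--     spaced = ''.join(c if is_ident(c) else ' ' for c in code_string)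
--     identifiers = set()
--     for run in spaced.split():
--         i = 0
--         while i < len(run) and not (run[i] == '_' or run[i].isalpha()):
--             i += 1
--         if i < len(run):
--             identifiers.add(run[i:])
--     return identifiers
-- ===== Notes on version B (the rewrite author's own statement) =====
-- stated objective: alternative
-- what changed: Replaces A's single-pass character state machine (with its trailing-space sentinel and list/None identifier state) by a two-pass decomposition: blank out every non-identifier character, split the result into maximal runs, and keep each run from its first underscore-or-alphabetic character on.
import Mathlib
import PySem

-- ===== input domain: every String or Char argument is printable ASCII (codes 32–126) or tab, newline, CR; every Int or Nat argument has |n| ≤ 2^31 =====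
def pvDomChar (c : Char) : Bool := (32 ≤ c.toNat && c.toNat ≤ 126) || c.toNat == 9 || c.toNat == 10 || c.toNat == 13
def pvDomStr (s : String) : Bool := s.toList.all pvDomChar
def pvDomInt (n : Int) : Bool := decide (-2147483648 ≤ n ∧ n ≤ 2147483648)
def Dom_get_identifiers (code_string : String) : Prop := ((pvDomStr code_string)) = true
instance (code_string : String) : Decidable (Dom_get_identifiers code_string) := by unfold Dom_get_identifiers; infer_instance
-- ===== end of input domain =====

-- B replaces A's one-pass state machine by a two-pass decomposition (blank out
-- separators, split into runs, strip each run to its first starter char);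
-- objective: alternative decomposition, same asymptotic cost.

-- ===== PORT A =====
-- Python truthiness of `identifier`: both [] and None are falsy, a nonempty list is truthy.
def pvTruthy (id? : Option (List Char)) : Bool :=
  match id? with
  | some l => !l.isEmpty
  | none => false

-- the body of A's `for c in code_string + ' '` loop, state = (identifiers, identifier)
def pvStepA (st : PySem.Set String × Option (List Char)) (c : Char) :
    PySem.Set String × Option (List Char) :=
  if pvTruthy st.2 && (c == '_' || PySem.Chars.isalnum c) then
    (st.1, some ((st.2.getD []) ++ [c]))            -- identifier.append(c)
  else if c == '_' || PySem.Chars.isalpha c then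
    (st.1, some [c])                                -- identifier = [c]
  else if pvTruthy st.2 then
    (PySem.Set.add st.1 (String.ofList (st.2.getD [])), none)   -- add ''.join(identifier); identifier = None
  else st

def get_identifiers (code_string : String) : List String :=
  ((code_string.toList ++ [' ']).foldl pvStepA (PySem.Set.empty, some [])).1

-- ===== PORT B =====
def pvIsIdent (c : Char) : Bool := c == '_' || PySem.Chars.isalnum c

def pvIsStarter (c : Char) : Bool := c == '_' || PySem.Chars.isalpha c

-- the body of B's `for run in spaced.split()` loop: the index scan `i` followed
-- by `run[i:]` is exactly dropWhile of the non-starter predicate.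
def pvAddWord (acc : PySem.Set String) (run : List Char) : PySem.Set String :=
  let w := run.dropWhile (fun c => !pvIsStarter c)
  if w.isEmpty then acc else PySem.Set.add acc (String.ofList w)

def get_identifiers_alt (code_string : String) : List String :=
  let spaced := code_string.toList.map (fun c => if pvIsIdent c then c else ' ')
  (PySem.Chars.split₀ spaced).foldl pvAddWord PySem.Set.empty

-- ===== PRECONDITION & SPEC =====
def Spec_get_identifiers (code_string : String) (out : List String) : Prop := out = get_identifiers_alt code_string
instance (code_string : String) (out : List String) : Decidable (Spec_get_identifiers code_string out) := by unfold Spec_get_identifiers; infer_instance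

-- ===== CLAIM (what is proved, stated in full; the proofs are below) =====
def Claim_equal_get_identifiers : Prop := ∀ (code_string : String), Dom_get_identifiers code_string → Spec_get_identifiers code_string (get_identifiers code_string)

-- ===== LEMMAS AND PROOFS =====
theorem pvCharLeNat {a b : Char} (h : a ≤ b) : a.toNat ≤ b.toNat := h

-- an identifier character is not Python whitespace
theorem pvIdent_not_space (c : Char) (h : pvIsIdent c = true) :
    PySem.Chars.isspace c = false := by
  rcases (Bool.or_eq_true _ _).mp h with h | h
  · have : c = '_' := by simpa using h
    subst this; decide
  · simp only [PySem.Chars.isalnum, PySem.Chars.isalpha, PySem.Chars.isdigit, PySem.Chars.isupper,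
      PySem.Chars.islower, Bool.or_eq_true, Bool.and_eq_true, decide_eq_true_eq] at h
    have hb : (65 ≤ c.toNat ∧ c.toNat ≤ 90) ∨ (97 ≤ c.toNat ∧ c.toNat ≤ 122) ∨
        (48 ≤ c.toNat ∧ c.toNat ≤ 57) := by
      rcases h with (⟨h1,h2⟩|⟨h1,h2⟩)|⟨h1,h2⟩
      · exact Or.inl ⟨pvCharLeNat h1, pvCharLeNat h2⟩
      · exact Or.inr (Or.inl ⟨pvCharLeNat h1, pvCharLeNat h2⟩)
      · exact Or.inr (Or.inr ⟨pvCharLeNat h1, pvCharLeNat h2⟩)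
    simp only [PySem.Chars.isspace, Bool.or_eq_false_iff, Bool.and_eq_false_iff,
      decide_eq_false_iff_not]
    omega

theorem pvStarter_ident (c : Char) (h : (c == '_' || PySem.Chars.isalpha c) = true) :
    pvIsIdent c = true := by
  simp only [pvIsIdent, PySem.Chars.isalnum, Bool.or_eq_true] at h ⊢
  tauto

theorem pvTruthy_eq (id? : Option (List Char)) : pvTruthy id? = !(id?.getD []).isEmpty := by
  cases id? <;> simp [pvTruthy]

-- split₀.go only conses onto its accumulator
theorem pvGoAcc (s : List Char) : ∀ (cur : List Char) (acc : List (List Char)),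
    PySem.Chars.split₀.go s cur acc = acc.reverse ++ PySem.Chars.split₀.go s cur [] := by
  induction s with
  | nil =>
    intro cur acc
    simp [PySem.Chars.split₀.go]
    split <;> simp
  | cons c rest ih =>
    intro cur acc
    simp only [PySem.Chars.split₀.go]
    split
    · split
      · exact ih [] acc
      · rw [ih [] (cur.reverse :: acc), ih [] [cur.reverse]]
        simp
    · exact ih (c :: cur) acc

-- the central invariant: A's machine state (ids, id?) after consuming some prefix,
-- where r is the current (possibly all-non-starter) run prefix and id? holds exactly
-- the part of r from its first starter character on.
theorem pvKey (l : List Char) : ∀ (ids : PySem.Set String) (id? : Option (List Char)) (r : List Char),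
    id?.getD [] = r.dropWhile (fun c => !pvIsStarter c) →
    (List.foldl pvStepA (ids, id?) (l ++ [' '])).1
      = (PySem.Chars.split₀.go (l.map (fun c => if pvIsIdent c then c else ' ')) r.reverse []).foldl pvAddWord ids := by
  induction l with
  | nil =>
    intro ids id? r h
    have htr : pvTruthy id? = !(r.dropWhile (fun c => !pvIsStarter c)).isEmpty := by
      rw [pvTruthy_eq, h]
    have hid : ((' ' == '_' || PySem.Chars.isalnum ' ')) = false := by decide
    have hst : ((' ' == '_' || PySem.Chars.isalpha ' ')) = false := by decide
    by_cases hr : r = []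
    · subst hr
      simp [PySem.Chars.split₀.go, pvStepA, htr,
        show PySem.Chars.isalpha ' ' = false from by decide]
    · have hrr : (r.reverse.isEmpty) = false := by simp [hr]
      simp only [List.nil_append, List.foldl_cons, List.foldl_nil, List.map_nil]
      simp only [PySem.Chars.split₀.go, hrr, Bool.false_eq_true, if_false, List.reverse_reverse]
      simp only [pvStepA, hid, hst, Bool.and_false, Bool.false_eq_true, if_false, htr]
      simp only [h]
      cases hw : (r.dropWhile (fun c => !pvIsStarter c)).isEmpty <;> simp [pvAddWord, hw]
  | cons c rest ih =>
    intro ids id? r h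
    have htr : pvTruthy id? = !(r.dropWhile (fun c => !pvIsStarter c)).isEmpty := by
      rw [pvTruthy_eq, h]
    have hid : (c == '_' || PySem.Chars.isalnum c) = pvIsIdent c := rfl
    have hstr : (c == '_' || PySem.Chars.isalpha c) = pvIsStarter c := rfl
    simp only [List.cons_append, List.foldl_cons, List.map_cons]
    by_cases hic : pvIsIdent c = true
    · -- identifier character: the run grows
      have hns : PySem.Chars.isspace c = false := pvIdent_not_space c hic
      rw [if_pos hic]
      simp only [PySem.Chars.split₀.go, hns, Bool.false_eq_true, if_false]
      have hrc : c :: r.reverse = (r ++ [c]).reverse := by simp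
      rw [hrc]
      by_cases ht : pvTruthy id? = true
      · have hw : ((r.dropWhile (fun c => !pvIsStarter c)).isEmpty) = false := by
          rw [ht] at htr; cases hh : (r.dropWhile (fun c => !pvIsStarter c)).isEmpty <;>
            simp [hh] at htr ⊢
        simp only [pvStepA, hid, hstr, ht, hic, Bool.and_self, if_true]
        apply ih
        simp only [Option.getD_some, List.dropWhile_append, hw, Bool.false_eq_true, if_false, h]
      · have hw : ((r.dropWhile (fun c => !pvIsStarter c)).isEmpty) = true := by
          cases hh : (r.dropWhile (fun c => !pvIsStarter c)).isEmpty <;>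
            rw [hh] at htr <;> simp [htr] at ht ⊢
        have ht' : pvTruthy id? = false := by simp [htr, hw]
        by_cases hstc : pvIsStarter c = true
        · simp only [pvStepA, hid, hstr, ht', hic, hstc, Bool.false_and, Bool.false_eq_true,
            if_false, if_true]
          apply ih
          simp only [Option.getD_some, List.dropWhile_append, hw, if_true,
            List.dropWhile_cons, hstc, Bool.not_true, Bool.false_eq_true, if_false]
        · simp only [pvStepA, hid, hstr, ht', hic, hstc, Bool.false_and, Bool.false_eq_true,
            if_false]
          apply ih
          have h0 : List.dropWhile (fun c => !pvIsStarter c) r = [] := List.isEmpty_iff.mp hw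
          rw [h, List.dropWhile_append, hw, h0]
          simp [hstc]
    · -- separator character: the run (if any) is flushed
      have hicf : pvIsIdent c = false := by simpa using hic
      have hstc : (c == '_' || PySem.Chars.isalpha c) = false := by
        cases hh : (c == '_' || PySem.Chars.isalpha c)
        · rfl
        · exact absurd (pvStarter_ident c hh) (by simp [hicf])
      have hspc : PySem.Chars.isspace ' ' = true := by decide
      rw [if_neg hic]
      simp only [PySem.Chars.split₀.go, hspc, if_true, List.reverse_reverse]
      simp only [pvStepA, hid, hicf, hstc, Bool.and_false, Bool.false_eq_true, if_false]
      by_cases ht : pvTruthy id? = true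
      · have hw : ((r.dropWhile (fun c => !pvIsStarter c)).isEmpty) = false := by
          rw [ht] at htr; cases hh : (r.dropWhile (fun c => !pvIsStarter c)).isEmpty <;>
            simp [hh] at htr ⊢
        have hr : r ≠ [] := by
          intro e; subst e; simp at hw
        have hrr : (r.reverse.isEmpty) = false := by simp [hr]
        rw [ht, if_pos rfl, hrr]
        simp only [Bool.false_eq_true, if_false]
        rw [pvGoAcc]
        simp only [List.reverse_cons, List.reverse_nil, List.nil_append, List.singleton_append,
          List.foldl_cons]
        have hA : pvAddWord ids r = PySem.Set.add ids (String.ofList (id?.getD [])) := by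
          simp only [pvAddWord, hw, Bool.false_eq_true, if_false, h]
        rw [hA]
        exact ih _ none [] (by simp)
      · have ht' : pvTruthy id? = false := by simpa using ht
        have hw : ((r.dropWhile (fun c => !pvIsStarter c)).isEmpty) = true := by
          cases hh : (r.dropWhile (fun c => !pvIsStarter c)).isEmpty <;>
            rw [hh] at htr <;> simp [htr] at ht' ⊢
        rw [ht']
        simp only [Bool.false_eq_true, if_false]
        by_cases hr : r = []
        · subst hr
          simp only [List.reverse_nil, List.isEmpty_nil, if_true]
          exact ih ids id? [] (by rw [h])
        · have hrr : (r.reverse.isEmpty) = false := by simp [hr]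
          rw [hrr]
          simp only [Bool.false_eq_true, if_false]
          rw [pvGoAcc]
          simp only [List.reverse_cons, List.reverse_nil, List.nil_append, List.singleton_append,
            List.foldl_cons]
          have hA : pvAddWord ids r = ids := by
            simp only [pvAddWord, hw, if_true]
          rw [hA]
          exact ih ids id? [] (by rw [h, List.isEmpty_iff.mp hw]; simp)

-- ===== VERDICT (by name: the statement is the Claim_ definition above) =====
theorem get_identifiers_spec : Claim_equal_get_identifiers := by
  intro s _
  show get_identifiers s = get_identifiers_alt s
  unfold get_identifiers get_identifiers_alt PySem.Chars.split₀
  exact pvKey s.toList PySem.Set.empty (some []) [] (by simp)
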